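-- pv_equiv track=rewrite | github.com/umutsoyyilmaz/SAP_Transformation_Platform | app/blueprints/traceability_bp.py | _find_gaps_in_chain
-- ===== SOURCE A (Python) =====
-- def _find_gaps_in_chain(entity_type, entity_id, chain):
--     """Find gaps in a standard entity chain."""
--     gaps = []
--     types_found = set(
--         item.get("type")
--         for item in chain.get("upstream", []) + chain.get("downstream", [])
--     )
--
--     if entity_type in ("backlog_item", "config_item"):
--         has_req = ("requirement" in types_found or "explore_requirement" in types_found)
--         if not has_req:
--             gaps.append({"level": "upstream", "message": "Not linked to a Requirement"})
--         if "test_case" not in types_found: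
--             gaps.append({"level": "downstream", "message": "No Test Cases created"})
--         if "functional_spec" not in types_found:
--             gaps.append({"level": "downstream", "message": "No Functional Spec written"})
--
--     elif entity_type == "requirement":
--         if "backlog_item" not in types_found and "config_item" not in types_found:
--             gaps.append({"level": "downstream", "message": "Not converted to WRICEF or Config item"})
--         if "scenario" not in types_found:
--             gaps.append({"level": "upstream", "message": "Not linked to a Scenario"})
--
--     elif entity_type == "test_case":
--         if "requirement" not in types_found and "backlog_item" not in types_found:
--             gaps.append({"level": "upstream", "message": "Not linked to a Requirement or Backlog item"})
--
--     elif entity_type == "functional_spec":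
--         if "backlog_item" not in types_found and "config_item" not in types_found:
--             gaps.append({"level": "upstream", "message": "Not linked to a WRICEF or Config item"})
--         if "technical_spec" not in types_found:
--             gaps.append({"level": "downstream", "message": "No Technical Spec created"})
--
--     elif entity_type == "interface":
--         if "backlog_item" not in types_found:
--             gaps.append({"level": "upstream", "message": "Not linked to a Backlog item"})
--         if "connectivity_test" not in types_found:
--             gaps.append({"level": "downstream", "message": "No connectivity tests executed"})
--
--     return gaps
-- ===== SOURCE B (Python) =====
-- # Subtractive single pass: start from the full ordered candidate-gap list for the
-- # entity type, then walk the chain items once, ELIMINATING every candidate whose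
-- # wanted-type set contains the item's type; whatever survives is the gap list.
-- _CANDIDATE_GAPS = {
--     "backlog_item": [
--         (frozenset({"requirement", "explore_requirement"}), "upstream", "Not linked to a Requirement"),
--         (frozenset({"test_case"}), "downstream", "No Test Cases created"),
--         (frozenset({"functional_spec"}), "downstream", "No Functional Spec written"),
--     ],
--     "requirement": [
--         (frozenset({"backlog_item", "config_item"}), "downstream", "Not converted to WRICEF or Config item"),
--         (frozenset({"scenario"}), "upstream", "Not linked to a Scenario"),
--     ],
--     "test_case": [
--         (frozenset({"requirement", "backlog_item"}), "upstream", "Not linked to a Requirement or Backlog item"),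
--     ],
--     "functional_spec": [
--         (frozenset({"backlog_item", "config_item"}), "upstream", "Not linked to a WRICEF or Config item"),
--         (frozenset({"technical_spec"}), "downstream", "No Technical Spec created"),
--     ],
--     "interface": [
--         (frozenset({"backlog_item"}), "upstream", "Not linked to a Backlog item"),
--         (frozenset({"connectivity_test"}), "downstream", "No connectivity tests executed"),
--     ],
-- }
-- _CANDIDATE_GAPS["config_item"] = _CANDIDATE_GAPS["backlog_item"]
--
--
-- def _find_gaps_in_chain(entity_type, entity_id, chain):
--     """Find gaps by eliminating satisfied candidates in one pass over the items."""
--     pending = list(_CANDIDATE_GAPS.get(entity_type, []))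
--     for item in chain.get("upstream", []) + chain.get("downstream", []):
--         t = item.get("type")
--         pending = [rule for rule in pending if t not in rule[0]]
--     return [{"level": level, "message": message} for _, level, message in pending]
-- ===== Notes on version B (the rewrite author's own statement) =====
-- stated objective: alternative
-- what changed: Instead of A's build-a-set-of-found-types then test a fixed if/elif chain of membership conditions, B starts from the full ordered candidate-gap list for the entity type and makes one subtractive pass over the chain items, eliminating each candidate as soon as an item of one of its wanted types appears; the survivors are the gaps (no types_found set, no per-rule membership tests).
import Mathlib
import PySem

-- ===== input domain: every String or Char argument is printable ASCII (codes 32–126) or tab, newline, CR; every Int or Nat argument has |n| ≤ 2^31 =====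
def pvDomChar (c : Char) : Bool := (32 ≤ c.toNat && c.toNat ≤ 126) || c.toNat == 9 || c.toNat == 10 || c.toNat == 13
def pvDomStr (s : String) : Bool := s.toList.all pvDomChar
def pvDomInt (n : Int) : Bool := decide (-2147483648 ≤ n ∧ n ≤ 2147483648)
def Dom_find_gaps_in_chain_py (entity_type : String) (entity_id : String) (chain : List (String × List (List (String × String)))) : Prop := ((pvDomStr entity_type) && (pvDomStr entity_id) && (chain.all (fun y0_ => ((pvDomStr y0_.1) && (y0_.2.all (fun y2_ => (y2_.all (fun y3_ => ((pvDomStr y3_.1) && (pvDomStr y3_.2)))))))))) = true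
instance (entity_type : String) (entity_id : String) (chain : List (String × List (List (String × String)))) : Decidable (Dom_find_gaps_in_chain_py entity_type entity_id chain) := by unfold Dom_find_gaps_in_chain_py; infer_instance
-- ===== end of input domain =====

-- B replaces A's build-a-type-set-then-test-conditions scheme by a subtractive single pass:
-- it starts from the full ordered candidate-gap list for the entity type and eliminates each
-- candidate while folding over the chain items; the survivors are the gaps (objective: alternative).


-- ===== PORT A =====
def find_gaps_in_chain_py (entity_type : String) (entity_id : String) (chain : List (String × List (List (String × String)))) : List (List (String × String)) :=
  let d := PySem.Dict.mk chain
  let types_found : PySem.Set (Option String) :=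
    PySem.Set.ofList ((PySem.Dict.getD d "upstream" [] ++ PySem.Dict.getD d "downstream" []).map
      (fun item => PySem.Dict.get? (PySem.Dict.mk item) "type"))
  if entity_type = "backlog_item" ∨ entity_type = "config_item" then
    let has_req := some "requirement" ∈ types_found ∨ some "explore_requirement" ∈ types_found
    (if ¬ has_req then [[("level", "upstream"), ("message", "Not linked to a Requirement")]] else []) ++
    (if some "test_case" ∉ types_found then [[("level", "downstream"), ("message", "No Test Cases created")]] else []) ++
    (if some "functional_spec" ∉ types_found then [[("level", "downstream"), ("message", "No Functional Spec written")]] else [])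
  else if entity_type = "requirement" then
    (if some "backlog_item" ∉ types_found ∧ some "config_item" ∉ types_found then [[("level", "downstream"), ("message", "Not converted to WRICEF or Config item")]] else []) ++
    (if some "scenario" ∉ types_found then [[("level", "upstream"), ("message", "Not linked to a Scenario")]] else [])
  else if entity_type = "test_case" then
    (if some "requirement" ∉ types_found ∧ some "backlog_item" ∉ types_found then [[("level", "upstream"), ("message", "Not linked to a Requirement or Backlog item")]] else [])
  else if entity_type = "functional_spec" then
    (if some "backlog_item" ∉ types_found ∧ some "config_item" ∉ types_found then [[("level", "upstream"), ("message", "Not linked to a WRICEF or Config item")]] else []) ++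
    (if some "technical_spec" ∉ types_found then [[("level", "downstream"), ("message", "No Technical Spec created")]] else [])
  else if entity_type = "interface" then
    (if some "backlog_item" ∉ types_found then [[("level", "upstream"), ("message", "Not linked to a Backlog item")]] else []) ++
    (if some "connectivity_test" ∉ types_found then [[("level", "downstream"), ("message", "No connectivity tests executed")]] else [])
  else []

-- ===== PORT B =====
-- the module-level candidate table _CANDIDATE_GAPS of Source B (entity_type -> ordered (wanted set, level, message) list;
-- each frozenset of wanted types is the corresponding distinct-element list)
def pvCandidateGaps : PySem.Dict String (List (List String × String × String)) := PySem.Dict.mk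
  [ ("backlog_item",
      [ (["requirement", "explore_requirement"], "upstream", "Not linked to a Requirement"),
        (["test_case"], "downstream", "No Test Cases created"),
        (["functional_spec"], "downstream", "No Functional Spec written") ]),
    ("requirement",
      [ (["backlog_item", "config_item"], "downstream", "Not converted to WRICEF or Config item"),
        (["scenario"], "upstream", "Not linked to a Scenario") ]),
    ("test_case",
      [ (["requirement", "backlog_item"], "upstream", "Not linked to a Requirement or Backlog item") ]),
    ("functional_spec",
      [ (["backlog_item", "config_item"], "upstream", "Not linked to a WRICEF or Config item"),
        (["technical_spec"], "downstream", "No Technical Spec created") ]),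
    ("interface",
      [ (["backlog_item"], "upstream", "Not linked to a Backlog item"),
        (["connectivity_test"], "downstream", "No connectivity tests executed") ]),
    ("config_item",
      [ (["requirement", "explore_requirement"], "upstream", "Not linked to a Requirement"),
        (["test_case"], "downstream", "No Test Cases created"),
        (["functional_spec"], "downstream", "No Functional Spec written") ]) ]

def find_gaps_in_chain_py_alt (entity_type : String) (entity_id : String) (chain : List (String × List (List (String × String)))) : List (List (String × String)) :=
  let d := PySem.Dict.mk chain
  let pending0 := PySem.Dict.getD pvCandidateGaps entity_type []
  -- the elimination loop: 't = item.get("type"); pending = [rule for rule in pending if t not in rule[0]]'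
  let pending := (PySem.Dict.getD d "upstream" [] ++ PySem.Dict.getD d "downstream" []).foldl
    (fun pend item =>
      pend.filter (fun rule => !(rule.1.any (fun w => PySem.Dict.get? (PySem.Dict.mk item) "type" == some w))))
    pending0
  pending.map (fun rule => [("level", rule.2.1), ("message", rule.2.2)])

-- ===== PRECONDITION & SPEC =====
def Spec_find_gaps_in_chain_py (entity_type : String) (entity_id : String) (chain : List (String × List (List (String × String)))) (out : List (List (String × String))) : Prop := out = find_gaps_in_chain_py_alt entity_type entity_id chain
instance (entity_type : String) (entity_id : String) (chain : List (String × List (List (String × String)))) (out : List (List (String × String))) : Decidable (Spec_find_gaps_in_chain_py entity_type entity_id chain out) := by unfold Spec_find_gaps_in_chain_py; infer_instance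

-- ===== CLAIM (what is proved, stated in full; the proofs are below) =====
def Claim_equal_find_gaps_in_chain_py : Prop := ∀ (entity_type : String) (entity_id : String) (chain : List (String × List (List (String × String)))), Dom_find_gaps_in_chain_py entity_type entity_id chain → Spec_find_gaps_in_chain_py entity_type entity_id chain (find_gaps_in_chain_py entity_type entity_id chain)

-- ===== LEMMAS AND PROOFS =====

-- folding a per-item filter over the items is filtering by "survives every item"
lemma foldl_filter {A B : Type} (p : A → B → Bool) (items : List B) :
    ∀ (init : List A),
      items.foldl (fun acc it => acc.filter (fun r => p r it)) init
        = init.filter (fun r => items.all (fun it => p r it)) := by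
  induction items with
  | nil => intro init; simp
  | cons it its ih =>
      intro init
      simp only [List.foldl_cons, ih, List.filter_filter, List.all_cons]
      congr 1
      funext r
      exact Bool.and_comm _ _

-- a candidate survives B's elimination pass iff none of its wanted types is in A's type set
lemma all_eq_decide {A : Type} (items : List A) (f : A → Option String) (ts : List String) :
    (items.all (fun it => !(ts.any (fun w => f it == some w)))) =
      !(decide (∃ t ∈ ts, some t ∈ PySem.Set.ofList (items.map f))) := by
  rw [Bool.eq_iff_iff]
  simp only [List.all_eq_true, Bool.not_eq_true', List.any_eq_false, beq_eq_false_iff_ne,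
    ne_eq, Bool.not_eq_eq_eq_not, Bool.not_true, decide_eq_false_iff_not,
    PySem.Set.mem_ofList, List.mem_map]
  constructor
  · rintro h ⟨t, ht, it, hit, hf⟩; exact h it hit t ht (by simp [hf])
  · intro h it hit t ht hf; exact h ⟨t, ht, it, hit, by simpa using hf⟩

-- ===== VERDICT (by name: the statement is the Claim_ definition above) =====
set_option maxHeartbeats 2000000 in
theorem find_gaps_in_chain_py_spec : Claim_equal_find_gaps_in_chain_py := by
  intro et eid chain _
  unfold Spec_find_gaps_in_chain_py
  by_cases h_backlog_item : et = "backlog_item"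
  · subst h_backlog_item
    unfold find_gaps_in_chain_py find_gaps_in_chain_py_alt pvCandidateGaps
    simp only [PySem.Dict.getD, PySem.Dict.get?_mk_cons, String.reduceBEq, String.reduceEq, beq_self_eq_true,
      if_true, if_false, Option.getD_some, foldl_filter]
    by_cases p1 : some "requirement" ∈ PySem.Set.ofList (List.map (fun item => PySem.Dict.get? (PySem.Dict.mk item) "type") (((PySem.Dict.mk chain).get? "upstream").getD [] ++ ((PySem.Dict.mk chain).get? "downstream").getD [])) <;>
    by_cases p2 : some "explore_requirement" ∈ PySem.Set.ofList (List.map (fun item => PySem.Dict.get? (PySem.Dict.mk item) "type") (((PySem.Dict.mk chain).get? "upstream").getD [] ++ ((PySem.Dict.mk chain).get? "downstream").getD [])) <;>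
    by_cases p3 : some "test_case" ∈ PySem.Set.ofList (List.map (fun item => PySem.Dict.get? (PySem.Dict.mk item) "type") (((PySem.Dict.mk chain).get? "upstream").getD [] ++ ((PySem.Dict.mk chain).get? "downstream").getD [])) <;>
    by_cases p4 : some "functional_spec" ∈ PySem.Set.ofList (List.map (fun item => PySem.Dict.get? (PySem.Dict.mk item) "type") (((PySem.Dict.mk chain).get? "upstream").getD [] ++ ((PySem.Dict.mk chain).get? "downstream").getD [])) <;>
    simp only [all_eq_decide, List.filter_cons, List.filter_nil, p1, p2, p3, p4,
      List.mem_cons, List.not_mem_nil, forall_eq_or_imp, forall_eq, exists_eq_or_imp, exists_eq_left,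
      exists_false, false_and, and_false, or_true, true_or, false_or, or_false, and_true, true_and,
      not_true, not_false_iff, not_or, decide_true, decide_false, Bool.not_true, Bool.not_false,
      if_true, if_false, List.map_cons, List.map_nil, List.append_nil, List.nil_append] <;>
    (try simp_all)
  by_cases h_config_item : et = "config_item"
  · subst h_config_item
    unfold find_gaps_in_chain_py find_gaps_in_chain_py_alt pvCandidateGaps
    simp only [PySem.Dict.getD, PySem.Dict.get?_mk_cons, String.reduceBEq, String.reduceEq, beq_self_eq_true,
      if_true, if_false, Option.getD_some, foldl_filter]
    by_cases p1 : some "requirement" ∈ PySem.Set.ofList (List.map (fun item => PySem.Dict.get? (PySem.Dict.mk item) "type") (((PySem.Dict.mk chain).get? "upstream").getD [] ++ ((PySem.Dict.mk chain).get? "downstream").getD [])) <;>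
    by_cases p2 : some "explore_requirement" ∈ PySem.Set.ofList (List.map (fun item => PySem.Dict.get? (PySem.Dict.mk item) "type") (((PySem.Dict.mk chain).get? "upstream").getD [] ++ ((PySem.Dict.mk chain).get? "downstream").getD [])) <;>
    by_cases p3 : some "test_case" ∈ PySem.Set.ofList (List.map (fun item => PySem.Dict.get? (PySem.Dict.mk item) "type") (((PySem.Dict.mk chain).get? "upstream").getD [] ++ ((PySem.Dict.mk chain).get? "downstream").getD [])) <;>
    by_cases p4 : some "functional_spec" ∈ PySem.Set.ofList (List.map (fun item => PySem.Dict.get? (PySem.Dict.mk item) "type") (((PySem.Dict.mk chain).get? "upstream").getD [] ++ ((PySem.Dict.mk chain).get? "downstream").getD [])) <;>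
    simp only [all_eq_decide, List.filter_cons, List.filter_nil, p1, p2, p3, p4,
      List.mem_cons, List.not_mem_nil, forall_eq_or_imp, forall_eq, exists_eq_or_imp, exists_eq_left,
      exists_false, false_and, and_false, or_true, true_or, false_or, or_false, and_true, true_and,
      not_true, not_false_iff, not_or, decide_true, decide_false, Bool.not_true, Bool.not_false,
      if_true, if_false, List.map_cons, List.map_nil, List.append_nil, List.nil_append] <;>
    (try simp_all)
  by_cases h_requirement : et = "requirement"
  · subst h_requirement
    unfold find_gaps_in_chain_py find_gaps_in_chain_py_alt pvCandidateGaps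
    simp only [PySem.Dict.getD, PySem.Dict.get?_mk_cons, String.reduceBEq, String.reduceEq, beq_self_eq_true,
      if_true, if_false, Option.getD_some, foldl_filter]
    by_cases p1 : some "backlog_item" ∈ PySem.Set.ofList (List.map (fun item => PySem.Dict.get? (PySem.Dict.mk item) "type") (((PySem.Dict.mk chain).get? "upstream").getD [] ++ ((PySem.Dict.mk chain).get? "downstream").getD [])) <;>
    by_cases p2 : some "config_item" ∈ PySem.Set.ofList (List.map (fun item => PySem.Dict.get? (PySem.Dict.mk item) "type") (((PySem.Dict.mk chain).get? "upstream").getD [] ++ ((PySem.Dict.mk chain).get? "downstream").getD [])) <;>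
    by_cases p3 : some "scenario" ∈ PySem.Set.ofList (List.map (fun item => PySem.Dict.get? (PySem.Dict.mk item) "type") (((PySem.Dict.mk chain).get? "upstream").getD [] ++ ((PySem.Dict.mk chain).get? "downstream").getD [])) <;>
    simp only [all_eq_decide, List.filter_cons, List.filter_nil, p1, p2, p3,
      List.mem_cons, List.not_mem_nil, forall_eq_or_imp, forall_eq, exists_eq_or_imp, exists_eq_left,
      exists_false, false_and, and_false, or_true, true_or, false_or, or_false, and_true, true_and,
      not_true, not_false_iff, not_or, decide_true, decide_false, Bool.not_true, Bool.not_false,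
      if_true, if_false, List.map_cons, List.map_nil, List.append_nil, List.nil_append] <;>
    (try simp_all)
  by_cases h_test_case : et = "test_case"
  · subst h_test_case
    unfold find_gaps_in_chain_py find_gaps_in_chain_py_alt pvCandidateGaps
    simp only [PySem.Dict.getD, PySem.Dict.get?_mk_cons, String.reduceBEq, String.reduceEq, beq_self_eq_true,
      if_true, if_false, Option.getD_some, foldl_filter]
    by_cases p1 : some "requirement" ∈ PySem.Set.ofList (List.map (fun item => PySem.Dict.get? (PySem.Dict.mk item) "type") (((PySem.Dict.mk chain).get? "upstream").getD [] ++ ((PySem.Dict.mk chain).get? "downstream").getD [])) <;>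
    by_cases p2 : some "backlog_item" ∈ PySem.Set.ofList (List.map (fun item => PySem.Dict.get? (PySem.Dict.mk item) "type") (((PySem.Dict.mk chain).get? "upstream").getD [] ++ ((PySem.Dict.mk chain).get? "downstream").getD [])) <;>
    simp only [all_eq_decide, List.filter_cons, List.filter_nil, p1, p2,
      List.mem_cons, List.not_mem_nil, forall_eq_or_imp, forall_eq, exists_eq_or_imp, exists_eq_left,
      exists_false, false_and, and_false, or_true, true_or, false_or, or_false, and_true, true_and,
      not_true, not_false_iff, not_or, decide_true, decide_false, Bool.not_true, Bool.not_false,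
      if_true, if_false, List.map_cons, List.map_nil, List.append_nil, List.nil_append] <;>
    (try simp_all)
  by_cases h_functional_spec : et = "functional_spec"
  · subst h_functional_spec
    unfold find_gaps_in_chain_py find_gaps_in_chain_py_alt pvCandidateGaps
    simp only [PySem.Dict.getD, PySem.Dict.get?_mk_cons, String.reduceBEq, String.reduceEq, beq_self_eq_true,
      if_true, if_false, Option.getD_some, foldl_filter]
    by_cases p1 : some "backlog_item" ∈ PySem.Set.ofList (List.map (fun item => PySem.Dict.get? (PySem.Dict.mk item) "type") (((PySem.Dict.mk chain).get? "upstream").getD [] ++ ((PySem.Dict.mk chain).get? "downstream").getD [])) <;>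
    by_cases p2 : some "config_item" ∈ PySem.Set.ofList (List.map (fun item => PySem.Dict.get? (PySem.Dict.mk item) "type") (((PySem.Dict.mk chain).get? "upstream").getD [] ++ ((PySem.Dict.mk chain).get? "downstream").getD [])) <;>
    by_cases p3 : some "technical_spec" ∈ PySem.Set.ofList (List.map (fun item => PySem.Dict.get? (PySem.Dict.mk item) "type") (((PySem.Dict.mk chain).get? "upstream").getD [] ++ ((PySem.Dict.mk chain).get? "downstream").getD [])) <;>
    simp only [all_eq_decide, List.filter_cons, List.filter_nil, p1, p2, p3,
      List.mem_cons, List.not_mem_nil, forall_eq_or_imp, forall_eq, exists_eq_or_imp, exists_eq_left,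
      exists_false, false_and, and_false, or_true, true_or, false_or, or_false, and_true, true_and,
      not_true, not_false_iff, not_or, decide_true, decide_false, Bool.not_true, Bool.not_false,
      if_true, if_false, List.map_cons, List.map_nil, List.append_nil, List.nil_append] <;>
    (try simp_all)
  by_cases h_interface : et = "interface"
  · subst h_interface
    unfold find_gaps_in_chain_py find_gaps_in_chain_py_alt pvCandidateGaps
    simp only [PySem.Dict.getD, PySem.Dict.get?_mk_cons, String.reduceBEq, String.reduceEq, beq_self_eq_true,
      if_true, if_false, Option.getD_some, foldl_filter]
    by_cases p1 : some "backlog_item" ∈ PySem.Set.ofList (List.map (fun item => PySem.Dict.get? (PySem.Dict.mk item) "type") (((PySem.Dict.mk chain).get? "upstream").getD [] ++ ((PySem.Dict.mk chain).get? "downstream").getD [])) <;>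
    by_cases p2 : some "connectivity_test" ∈ PySem.Set.ofList (List.map (fun item => PySem.Dict.get? (PySem.Dict.mk item) "type") (((PySem.Dict.mk chain).get? "upstream").getD [] ++ ((PySem.Dict.mk chain).get? "downstream").getD [])) <;>
    simp only [all_eq_decide, List.filter_cons, List.filter_nil, p1, p2,
      List.mem_cons, List.not_mem_nil, forall_eq_or_imp, forall_eq, exists_eq_or_imp, exists_eq_left,
      exists_false, false_and, and_false, or_true, true_or, false_or, or_false, and_true, true_and,
      not_true, not_false_iff, not_or, decide_true, decide_false, Bool.not_true, Bool.not_false,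
      if_true, if_false, List.map_cons, List.map_nil, List.append_nil, List.nil_append] <;>
    (try simp_all)
  · unfold find_gaps_in_chain_py find_gaps_in_chain_py_alt pvCandidateGaps
    simp only [PySem.Dict.getD, PySem.Dict.get?_mk_cons,
      beq_eq_false_iff_ne.mpr (Ne.symm h_backlog_item), beq_eq_false_iff_ne.mpr (Ne.symm h_config_item),
      beq_eq_false_iff_ne.mpr (Ne.symm h_requirement), beq_eq_false_iff_ne.mpr (Ne.symm h_test_case),
      beq_eq_false_iff_ne.mpr (Ne.symm h_functional_spec), beq_eq_false_iff_ne.mpr (Ne.symm h_interface),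
      h_backlog_item, h_config_item, h_requirement, h_test_case, h_functional_spec, h_interface,
      if_false, or_self, or_false, false_or, Option.getD_none, List.filter_nil, List.map_nil, foldl_filter]
    simp [PySem.Dict.get?]
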